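-- pv_equiv track=rewrite | github.com/suvirgupta/Projects | MarketBasketAnalysis/testspark.py | tuplesort
-- ===== SOURCE A (Python) =====
-- def tuplesort(a,b,c,d,e):
--     combined = list()
--     x,y,z,s,t=(),(),(),(),()
--     for i in range(len(b)):
--         combined.append((a[i],int(b[i]),c[i],d[i],e[i]))
--     j= sorted(combined, key= lambda x : x[1])
--     for i in range(len(combined)):
--         x,y,z,s,t= x + (j[i][0],), y+(j[i][1],), z+ (j[i][2],), s + (j[i][3],), t +(j[i][4],)
--     return [x,y,z,s,t]
-- ===== SOURCE B (Python) =====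
-- def tuplesort(a, b, c, d, e):
--     order = sorted(range(len(b)), key=lambda i: int(b[i]))
--     x = tuple(a[i] for i in order)
--     y = tuple(int(b[i]) for i in order)
--     z = tuple(c[i] for i in order)
--     s = tuple(d[i] for i in order)
--     t = tuple(e[i] for i in order)
--     return [x, y, z, s, t]
-- ===== Notes on version B (the rewrite author's own statement) =====
-- stated objective: faster
-- what changed: B computes a stable argsort of the indices by int(b[i]) and gathers each output column through that permutation in one pass each, instead of materialising a list of 5-tuples, sorting it, and rebuilding the five outputs by repeated quadratic tuple concatenation.
import Mathlib
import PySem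

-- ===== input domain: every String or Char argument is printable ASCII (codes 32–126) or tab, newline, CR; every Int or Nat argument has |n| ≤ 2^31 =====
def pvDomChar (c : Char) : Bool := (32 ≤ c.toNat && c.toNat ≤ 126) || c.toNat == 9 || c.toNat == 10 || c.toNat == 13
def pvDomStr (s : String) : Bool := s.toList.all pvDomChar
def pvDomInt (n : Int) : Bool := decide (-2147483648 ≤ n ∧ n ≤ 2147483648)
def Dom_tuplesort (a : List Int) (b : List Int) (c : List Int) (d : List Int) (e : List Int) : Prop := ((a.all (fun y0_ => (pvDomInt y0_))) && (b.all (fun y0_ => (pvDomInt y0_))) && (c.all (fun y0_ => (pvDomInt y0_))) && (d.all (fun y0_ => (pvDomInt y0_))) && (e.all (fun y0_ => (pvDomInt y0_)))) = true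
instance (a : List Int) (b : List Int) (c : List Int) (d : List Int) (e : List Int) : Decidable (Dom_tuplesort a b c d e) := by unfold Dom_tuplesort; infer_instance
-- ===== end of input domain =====

-- B replaces A's build-5-tuples / sort / quadratic tuple-concat unzip with a stable
-- argsort of the indices by b[i] followed by five independent gather passes (measured faster).
-- ===== PORT A =====
def tuplesort (a : List Int) (b : List Int) (c : List Int) (d : List Int) (e : List Int) : List (List Int) :=
  let combined := (PySem.List.pyRange 0 (b.length : Int) 1).foldl
    (fun acc i => acc ++ [(PySem.List.pyGetD a i 0, PySem.List.pyGetD b i 0,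
                           PySem.List.pyGetD c i 0, PySem.List.pyGetD d i 0,
                           PySem.List.pyGetD e i 0)]) []
  let j := PySem.List.sorted combined (fun x => x.2.1) false
  let r := (PySem.List.pyRange 0 (combined.length : Int) 1).foldl
    (fun (acc : List Int × List Int × List Int × List Int × List Int) i =>
      let ji := PySem.List.pyGetD j i (0, 0, 0, 0, 0)
      (acc.1 ++ [ji.1], acc.2.1 ++ [ji.2.1], acc.2.2.1 ++ [ji.2.2.1],
       acc.2.2.2.1 ++ [ji.2.2.2.1], acc.2.2.2.2 ++ [ji.2.2.2.2]))
    ([], [], [], [], [])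
  [r.1, r.2.1, r.2.2.1, r.2.2.2.1, r.2.2.2.2]

-- ===== PORT B =====
def tuplesort_alt (a : List Int) (b : List Int) (c : List Int) (d : List Int) (e : List Int) : List (List Int) :=
  let order := PySem.List.sorted (PySem.List.pyRange 0 (b.length : Int) 1)
    (fun i => PySem.List.pyGetD b i 0) false
  [order.map (fun i => PySem.List.pyGetD a i 0),
   order.map (fun i => PySem.List.pyGetD b i 0),
   order.map (fun i => PySem.List.pyGetD c i 0),
   order.map (fun i => PySem.List.pyGetD d i 0),
   order.map (fun i => PySem.List.pyGetD e i 0)]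

-- ===== PRECONDITION & SPEC =====
-- Pre_ excludes exactly the inputs on which Python A raises IndexError: a, c, d or e shorter than b.
def Pre_tuplesort (a : List Int) (b : List Int) (c : List Int) (d : List Int) (e : List Int) : Prop :=
  b.length ≤ a.length ∧ b.length ≤ c.length ∧ b.length ≤ d.length ∧ b.length ≤ e.length
instance (a : List Int) (b : List Int) (c : List Int) (d : List Int) (e : List Int) : Decidable (Pre_tuplesort a b c d e) := by unfold Pre_tuplesort; infer_instance
def pvWitness_tuplesort : List Int × List Int × List Int × List Int × List Int :=
  ([1, 2], [2, 1], [3, 4], [5, 6], [7, 8])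
def Spec_tuplesort (a : List Int) (b : List Int) (c : List Int) (d : List Int) (e : List Int) (out : List (List Int)) : Prop := out = tuplesort_alt a b c d e
instance (a : List Int) (b : List Int) (c : List Int) (d : List Int) (e : List Int) (out : List (List Int)) : Decidable (Spec_tuplesort a b c d e out) := by unfold Spec_tuplesort; infer_instance

-- ===== CLAIM (what is proved, stated in full; the proofs are below) =====
def Claim_equal_tuplesort : Prop := ∀ (a : List Int) (b : List Int) (c : List Int) (d : List Int) (e : List Int), Dom_tuplesort a b c d e → Pre_tuplesort a b c d e → Spec_tuplesort a b c d e (tuplesort a b c d e)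

-- ===== LEMMAS AND PROOFS =====

-- insertBy commutes with map when the comparison only reads the key, and key ∘ f = kk.
theorem insertBy_map {α β : Type} (f : α → β) (key : β → Int) (kk : α → Int)
    (hk : ∀ i, key (f i) = kk i) (x : α) (ys : List α) :
    PySem.List.insertBy (fun p q => decide (key p < key q)) (f x) (ys.map f)
      = (PySem.List.insertBy (fun p q => decide (kk p < kk q)) x ys).map f := by
  induction ys with
  | nil => simp [PySem.List.insertBy]
  | cons y t ih =>
    simp only [List.map_cons, PySem.List.insertBy, hk]
    split <;> simp [ih]

-- stable sort of a mapped list by a key that factors through the map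
theorem sorted_map_factor {α β : Type} (f : α → β) (key : β → Int) (kk : α → Int)
    (hk : ∀ i, key (f i) = kk i) (xs : List α) :
    PySem.List.sorted (xs.map f) key false
      = (PySem.List.sorted xs kk false).map f := by
  rw [PySem.List.sorted_eq_foldl_insertBy, PySem.List.sorted_eq_foldl_insertBy, List.foldl_map]
  suffices h : ∀ (acc : List α),
      xs.foldl (fun acc x => PySem.List.insertBy (fun p q => decide (key p < key q)) (f x) acc) (acc.map f)
        = (xs.foldl (fun acc x => PySem.List.insertBy (fun p q => decide (kk p < kk q)) x acc) acc).map f by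
    simpa using h []
  induction xs with
  | nil => intro acc; simp
  | cons x t ih =>
    intro acc
    simp only [List.foldl_cons, insertBy_map f key kk hk, ih]

-- the second loop of A (fold appending each component) produces the five projection maps
theorem unzip_fold (j : List (Int × Int × Int × Int × Int))
    (acc : List Int × List Int × List Int × List Int × List Int) :
    j.foldl (fun (acc : List Int × List Int × List Int × List Int × List Int) ji =>
        (acc.1 ++ [ji.1], acc.2.1 ++ [ji.2.1], acc.2.2.1 ++ [ji.2.2.1],
         acc.2.2.2.1 ++ [ji.2.2.2.1], acc.2.2.2.2 ++ [ji.2.2.2.2])) acc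
      = (acc.1 ++ j.map (·.1), acc.2.1 ++ j.map (·.2.1), acc.2.2.1 ++ j.map (·.2.2.1),
         acc.2.2.2.1 ++ j.map (·.2.2.2.1), acc.2.2.2.2 ++ j.map (·.2.2.2.2)) := by
  induction j generalizing acc with
  | nil => simp
  | cons x t ih => simp [ih]

-- A's index loop over range(len(j)) with j[i] lookups, in closed form
theorem unzip_fold_idx (j : List (Int × Int × Int × Int × Int)) :
    (PySem.List.pyRange 0 (j.length : Int) 1).foldl
      (fun (acc : List Int × List Int × List Int × List Int × List Int) i =>
        (acc.1 ++ [(PySem.List.pyGetD j i (0, 0, 0, 0, 0)).1],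
         acc.2.1 ++ [(PySem.List.pyGetD j i (0, 0, 0, 0, 0)).2.1],
         acc.2.2.1 ++ [(PySem.List.pyGetD j i (0, 0, 0, 0, 0)).2.2.1],
         acc.2.2.2.1 ++ [(PySem.List.pyGetD j i (0, 0, 0, 0, 0)).2.2.2.1],
         acc.2.2.2.2 ++ [(PySem.List.pyGetD j i (0, 0, 0, 0, 0)).2.2.2.2]))
      ([], [], [], [], [])
      = (j.map (·.1), j.map (·.2.1), j.map (·.2.2.1), j.map (·.2.2.2.1), j.map (·.2.2.2.2)) := by
  rw [PySem.List.foldl_pyRange_zero_pyGetD' j (0, 0, 0, 0, 0)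
    (fun (acc : List Int × List Int × List Int × List Int × List Int) ji =>
      (acc.1 ++ [ji.1], acc.2.1 ++ [ji.2.1], acc.2.2.1 ++ [ji.2.2.1],
       acc.2.2.2.1 ++ [ji.2.2.2.1], acc.2.2.2.2 ++ [ji.2.2.2.2])) ([], [], [], [], [])]
  simpa using unzip_fold j ([], [], [], [], [])

theorem tuplesort_eq_alt (a b c d e : List Int) :
    tuplesort a b c d e = tuplesort_alt a b c d e := by
  have hcomb : List.foldl
      (fun acc i => acc ++ [(PySem.List.pyGetD a i 0, PySem.List.pyGetD b i 0,
                             PySem.List.pyGetD c i 0, PySem.List.pyGetD d i 0,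
                             PySem.List.pyGetD e i 0)]) []
      (PySem.List.pyRange 0 (b.length : Int) 1)
      = (PySem.List.pyRange 0 (b.length : Int) 1).map
          (fun i => (PySem.List.pyGetD a i 0, PySem.List.pyGetD b i 0,
                     PySem.List.pyGetD c i 0, PySem.List.pyGetD d i 0,
                     PySem.List.pyGetD e i 0)) := by
    simpa using PySem.List.foldl_append_singleton_eq_map
      (fun i => (PySem.List.pyGetD a i 0, PySem.List.pyGetD b i 0,
                 PySem.List.pyGetD c i 0, PySem.List.pyGetD d i 0,
                 PySem.List.pyGetD e i 0))
      (PySem.List.pyRange 0 (b.length : Int) 1) []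
  have hsort := sorted_map_factor
      (fun i => (PySem.List.pyGetD a i 0, PySem.List.pyGetD b i 0,
                 PySem.List.pyGetD c i 0, PySem.List.pyGetD d i 0,
                 PySem.List.pyGetD e i 0))
      (fun x => x.2.1) (fun i => PySem.List.pyGetD b i 0) (fun _ => rfl)
      (PySem.List.pyRange 0 (b.length : Int) 1)
  have hlen : ((((PySem.List.pyRange 0 (b.length : Int) 1).map
      (fun i => (PySem.List.pyGetD a i 0, PySem.List.pyGetD b i 0,
                 PySem.List.pyGetD c i 0, PySem.List.pyGetD d i 0,
                 PySem.List.pyGetD e i 0))).length : Int) : Int)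
      = ((((PySem.List.sorted (PySem.List.pyRange 0 (b.length : Int) 1)
            (fun i => PySem.List.pyGetD b i 0) false).map
          (fun i => (PySem.List.pyGetD a i 0, PySem.List.pyGetD b i 0,
                     PySem.List.pyGetD c i 0, PySem.List.pyGetD d i 0,
                     PySem.List.pyGetD e i 0))).length : Int) : Int) := by
    simp only [List.length_map, PySem.List.length_sorted]
  simp only [tuplesort, tuplesort_alt, hcomb, hsort, hlen, unzip_fold_idx]
  simp [List.map_map, Function.comp]

-- ===== VERDICT (by name: the statement is the Claim_ definition above) =====
theorem tuplesort_spec : Claim_equal_tuplesort := by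
  intro a b c d e _ _
  exact tuplesort_eq_alt a b c d e
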